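-- pv_equiv track=rewrite | github.com/supergreenlab/SuperGreenOS | main/m5tft/utils/generate_c_pic.py | pack_bytes
-- ===== SOURCE A (Python) =====
-- def pack_bytes(byte_list):
-- 	packed_list = []
-- 	for i in range(0, len(byte_list), 2):
-- 		if i + 1 < len(byte_list):
-- 			second_byte = byte_list[i + 1]
-- 		else:
-- 			second_byte = 0
--
-- 		packed_byte = (byte_list[i] << 4) + second_byte
-- 		packed_list.append(packed_byte)
--
-- 	return packed_list
-- ===== SOURCE B (Python) =====
-- def pack_bytes(byte_list):
--     evens = byte_list[0::2]
--     odds = byte_list[1::2]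
--     odds = odds + [0] * (len(evens) - len(odds))
--     return [(a << 4) + b for a, b in zip(evens, odds)]
-- ===== Notes on version B (the rewrite author's own statement) =====
-- stated objective: idiomatic
-- what changed: Replaces the index-stepping loop with its in-range test by slicing the list into even- and odd-position streams, zero-padding the odd stream, and zipping the two streams into packed values.
import Mathlib
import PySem

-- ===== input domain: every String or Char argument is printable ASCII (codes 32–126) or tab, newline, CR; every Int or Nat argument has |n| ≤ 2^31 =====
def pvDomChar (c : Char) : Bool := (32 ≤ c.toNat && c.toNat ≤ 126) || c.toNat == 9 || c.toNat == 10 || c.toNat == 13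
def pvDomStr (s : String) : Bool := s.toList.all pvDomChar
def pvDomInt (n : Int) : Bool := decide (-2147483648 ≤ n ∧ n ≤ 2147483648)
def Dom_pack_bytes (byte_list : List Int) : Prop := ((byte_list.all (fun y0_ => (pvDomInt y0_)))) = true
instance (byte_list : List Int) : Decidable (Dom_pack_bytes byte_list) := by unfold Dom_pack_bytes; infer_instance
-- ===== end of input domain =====

-- B replaces A's index-stepping loop with even/odd slices zipped after zero-padding (idiomatic; same cost).

-- ===== PORT A =====
-- literal transliteration of A: for i in range(0, len, 2): append (xs[i] << 4) + (xs[i+1] if i+1 < len else 0)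
def pack_bytes (byte_list : List Int) : List Int :=
  (PySem.List.pyRange 0 byte_list.length 2).foldl
    (fun packed_list i =>
      let second_byte : Int :=
        if i + 1 < (byte_list.length : Int) then PySem.List.pyGetD byte_list (i + 1) 0 else 0
      let packed_byte := (PySem.List.pyGetD byte_list i 0) <<< (4 : Int) + second_byte
      packed_list ++ [packed_byte]) []

-- ===== PORT B =====
-- literal transliteration of Source B: evens = xs[0::2]; odds = xs[1::2] + [0]*(len(evens)-len(odds)); zip and pack.
-- (Python's [0] * n is [] for n ≤ 0, matching Nat truncated subtraction here.)
def pack_bytes_alt (byte_list : List Int) : List Int :=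
  let evens := (PySem.List.slice? byte_list (some 0) none 2).getD []
  let odds₀ := (PySem.List.slice? byte_list (some 1) none 2).getD []
  let odds := odds₀ ++ List.replicate (evens.length - odds₀.length) 0
  (evens.zip odds).map (fun p => p.1 <<< (4 : Int) + p.2)

-- ===== PRECONDITION & SPEC =====
def Spec_pack_bytes (byte_list : List Int) (out : List Int) : Prop := out = pack_bytes_alt byte_list
instance (byte_list : List Int) (out : List Int) : Decidable (Spec_pack_bytes byte_list out) := by unfold Spec_pack_bytes; infer_instance

-- ===== CLAIM (what is proved, stated in full; the proofs are below) =====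
def Claim_equal_pack_bytes : Prop := ∀ (byte_list : List Int), Dom_pack_bytes byte_list → Spec_pack_bytes byte_list (pack_bytes byte_list)

-- ===== LEMMAS AND PROOFS =====

-- common two-at-a-time characterisation of the result
def pairsGo : List Int → List Int
  | [] => []
  | [a] => [a <<< (4 : Int)]
  | a :: b :: t => (a <<< (4 : Int) + b) :: pairsGo t

def evensOf : List Int → List Int
  | [] => []
  | [a] => [a]
  | a :: _ :: t => a :: evensOf t

def oddsOf : List Int → List Int
  | [] => []
  | [_] => []
  | _ :: b :: t => b :: oddsOf t

theorem pyRange_two_cons (a b : Int) (h : a < b) :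
    PySem.List.pyRange a b 2 = a :: PySem.List.pyRange (a + 2) b 2 := by
  rw [PySem.List.pyRange_of_pos a b (by norm_num), PySem.List.pyRange_of_pos (a + 2) b (by norm_num)]
  by_cases h2 : a + 2 < b
  · simp only [if_pos h, if_pos h2]
    have hc : (b - a + 2 - 1) / 2 = (b - (a + 2) + 2 - 1) / 2 + 1 := by omega
    have hn : ((b - a + 2 - 1) / 2).toNat = ((b - (a + 2) + 2 - 1) / 2).toNat + 1 := by omega
    rw [hn, List.range_succ_eq_map]
    simp [List.map_map, Function.comp_def, mul_add]
    ring_nf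
    simp
  · simp only [if_pos h, if_neg h2]
    have hn : ((b - a + 2 - 1) / 2).toNat = 1 := by omega
    rw [hn]
    simp

theorem pyRange_two_nil (a b : Int) (h : b ≤ a) : PySem.List.pyRange a b 2 = [] := by
  rw [PySem.List.pyRange_of_pos a b (by norm_num)]
  simp [not_lt.mpr h]

theorem pack_bytes_go :
    ∀ (t pre acc : List Int),
      (PySem.List.pyRange (pre.length : Int) ((pre.length : Int) + t.length) 2).foldl
        (fun packed_list i =>
          let second_byte : Int :=
            if i + 1 < ((pre ++ t).length : Int) then PySem.List.pyGetD (pre ++ t) (i + 1) 0 else 0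
          let packed_byte := (PySem.List.pyGetD (pre ++ t) i 0) <<< (4 : Int) + second_byte
          packed_list ++ [packed_byte]) acc = acc ++ pairsGo t := by
  intro t
  induction t using pairsGo.induct with
  | case1 =>
      intro pre acc
      rw [show ((pre.length : Int) + ([] : List Int).length) = (pre.length : Int) by simp,
        pyRange_two_nil _ _ le_rfl]
      simp [pairsGo]
  | case2 a =>
      intro pre acc
      rw [show ((pre.length : Int) + ([a] : List Int).length) = (pre.length : Int) + 1 by simp,
        pyRange_two_cons _ _ (by omega), pyRange_two_nil _ _ (by omega)]
      have h1 : PySem.List.pyGetD (pre ++ [a]) (pre.length : Int) 0 = a := by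
        rw [PySem.List.pyGetD_natCast]
        simp [List.getD]
      have h2 : ¬ ((pre.length : Int) + 1 < ((pre ++ [a]).length : Int)) := by
        simp
      simp only [List.foldl, h1, if_neg h2, pairsGo]
      simp
  | case3 a b t ih =>
      intro pre acc
      have hlen : ((pre.length : Int) + (a :: b :: t).length) = (pre.length : Int) + t.length + 2 := by
        simp only [List.length_cons]; push_cast; omega
      rw [hlen, pyRange_two_cons _ _ (by omega)]
      have h1 : PySem.List.pyGetD (pre ++ a :: b :: t) (pre.length : Int) 0 = a := by
        rw [PySem.List.pyGetD_natCast]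
        simp [List.getD]
      have h2 : ((pre.length : Int) + 1 < ((pre ++ a :: b :: t).length : Int)) := by
        simp only [List.length_append, List.length_cons]; push_cast; omega
      have h3 : PySem.List.pyGetD (pre ++ a :: b :: t) ((pre.length : Int) + 1) 0 = b := by
        have : ((pre.length : Int) + 1) = ((pre.length + 1 : Nat) : Int) := by push_cast; ring
        rw [this, PySem.List.pyGetD_natCast]
        simp [List.getD]
      simp only [List.foldl, h1, if_pos h2, h3]
      have hpre : pre ++ a :: b :: t = (pre ++ [a, b]) ++ t := by simp
      have hlab : (pre ++ [a, b]).length = pre.length + 2 := by simp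
      have hplen : ((pre.length : Int) + 2) = (((pre ++ [a, b]).length : Nat) : Int) := by
        rw [hlab]; push_cast; ring
      have hplen2 : ((pre.length : Int) + (t.length : Int) + 2) =
          (((pre ++ [a, b]).length : Nat) : Int) + t.length := by
        rw [hlab]; push_cast; ring
      rw [hpre, hplen, hplen2, ih (pre ++ [a, b]) (acc ++ [a <<< (4:Int) + b])]
      simp [pairsGo]

theorem fm_evens : ∀ (xs : List Int),
    (List.range ((xs.length + 1) / 2)).filterMap (fun k => xs[2 * k]?) = evensOf xs := by
  intro xs
  induction xs using evensOf.induct with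
  | case1 => simp [evensOf]
  | case2 a => simp [evensOf]
  | case3 a b t ih =>
      have hn : ((a :: b :: t).length + 1) / 2 = (t.length + 1) / 2 + 1 := by simp; omega
      rw [hn, List.range_succ_eq_map, List.filterMap_cons, List.filterMap_map]
      have hf : ((fun k => (a :: b :: t)[2 * k]?) ∘ Nat.succ) = fun k => t[2 * k]? := by
        funext k
        have : 2 * Nat.succ k = (2 * k).succ.succ := by omega
        simp [Function.comp, this]
      simp only [hf, ih]
      simp [evensOf]

theorem fm_odds : ∀ (xs : List Int),
    (List.range (xs.length / 2)).filterMap (fun k => xs[2 * k + 1]?) = oddsOf xs := by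
  intro xs
  induction xs using oddsOf.induct with
  | case1 => simp [oddsOf]
  | case2 a => simp [oddsOf]
  | case3 a b t ih =>
      have hn : (a :: b :: t).length / 2 = t.length / 2 + 1 := by simp; omega
      rw [hn, List.range_succ_eq_map, List.filterMap_cons, List.filterMap_map]
      have hf : ((fun k => (a :: b :: t)[2 * k + 1]?) ∘ Nat.succ) = fun k => t[2 * k + 1]? := by
        funext k
        have : 2 * Nat.succ k + 1 = (2 * k + 1).succ.succ := by omega
        simp [Function.comp, this]
      simp only [hf, ih]
      simp [oddsOf]

theorem slice2_evens (xs : List Int) :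
    PySem.List.slice? xs (some 0) none 2 = some (evensOf xs) := by
  rw [PySem.List.slice?, PySem.List.sliceIndices]
  simp only [if_neg (by norm_num : ¬ (2:Int) = 0)]
  have hmin : min (0 : Int) (xs.length : Int) = 0 := by omega
  simp only [if_neg (by norm_num : ¬ ((2:Int) < 0)), if_neg (by norm_num : ¬ ((0:Int) < 0)), hmin]
  by_cases h : (0 : Int) < (xs.length : Int)
  · simp only [if_pos h, if_pos (by norm_num : (0:Int) < 2)]
    have hc : (((xs.length : Int) - 0 + 2 - 1) / 2).toNat = (xs.length + 1) / 2 := by omega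
    rw [hc, ← fm_evens xs]
    congr 1
    apply List.filterMap_congr
    intro k _
    have : ((0 : Int) + 2 * (k : Int)).toNat = 2 * k := by omega
    rw [this]
  · simp only [if_neg h, if_pos (by norm_num : (0:Int) < 2)]
    have : xs = [] := by
      cases xs with
      | nil => rfl
      | cons a t => exfalso; apply h; simp
    subst this
    simp [evensOf]

theorem slice2_odds (xs : List Int) :
    PySem.List.slice? xs (some 1) none 2 = some (oddsOf xs) := by
  rw [PySem.List.slice?, PySem.List.sliceIndices]
  simp only [if_neg (by norm_num : ¬ (2:Int) = 0)]
  simp only [if_neg (by norm_num : ¬ ((2:Int) < 0)), if_neg (by norm_num : ¬ ((1:Int) < 0))]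
  by_cases hnil : xs = []
  · subst hnil; simp [oddsOf]
  · have hlen : 1 ≤ xs.length := by
      cases xs with
      | nil => exact absurd rfl hnil
      | cons a t => simp
    have hmin : min (1 : Int) (xs.length : Int) = 1 := by omega
    rw [hmin]
    by_cases h : (1 : Int) < (xs.length : Int)
    · simp only [if_pos h, if_pos (by norm_num : (0:Int) < 2)]
      have hc : (((xs.length : Int) - 1 + 2 - 1) / 2).toNat = xs.length / 2 := by omega
      rw [hc, ← fm_odds xs]
      congr 1
      apply List.filterMap_congr
      intro k _
      have : ((1 : Int) + 2 * (k : Int)).toNat = 2 * k + 1 := by omega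
      rw [this]
    · simp only [if_neg h, if_pos (by norm_num : (0:Int) < 2)]
      have hx : xs.length = 1 := by omega
      cases xs with
      | nil => exact absurd rfl hnil
      | cons a t =>
          have : t = [] := by simp at hx; exact hx
          subst this
          simp [oddsOf]

theorem zip_pad_eq_pairsGo : ∀ (xs : List Int),
    ((evensOf xs).zip (oddsOf xs ++ List.replicate ((evensOf xs).length - (oddsOf xs).length) 0)).map
      (fun p => p.1 <<< (4 : Int) + p.2) = pairsGo xs := by
  intro xs
  induction xs using pairsGo.induct with
  | case1 => simp [evensOf, oddsOf, pairsGo]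
  | case2 a => simp [evensOf, oddsOf, pairsGo]
  | case3 a b t ih =>
      simp only [evensOf, oddsOf, pairsGo, List.length_cons]
      have : (evensOf t).length + 1 - ((oddsOf t).length + 1) = (evensOf t).length - (oddsOf t).length := by
        omega
      rw [this, List.cons_append, List.zip_cons_cons, List.map_cons, ih]

theorem pack_bytes_eq_pairsGo (byte_list : List Int) : pack_bytes byte_list = pairsGo byte_list := by
  have := pack_bytes_go byte_list [] []
  simpa [pack_bytes] using this

theorem pack_bytes_alt_eq_pairsGo (byte_list : List Int) :
    pack_bytes_alt byte_list = pairsGo byte_list := by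
  rw [pack_bytes_alt]
  simp only [slice2_evens, slice2_odds, Option.getD_some]
  exact zip_pad_eq_pairsGo byte_list

-- ===== VERDICT (by name: the statement is the Claim_ definition above) =====
theorem pack_bytes_spec : Claim_equal_pack_bytes := by
  intro byte_list _
  unfold Spec_pack_bytes
  rw [pack_bytes_eq_pairsGo, pack_bytes_alt_eq_pairsGo]
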